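-- pv_equiv track=rewrite | github.com/aaronthangnguyen/watermark | references/euclid.py | get_aspect_ratio
-- ===== SOURCE A (Python) =====
-- def get_aspect_ratio(resolution):
--     '''
--     Signature:  Tuple -> Tuple
--     Purpose:    Produce a tuple that shows aspect ratio of an image from
--                 a given resolution of image using Euclid's algorithm to find Greatest
--                 Comman Divisor, recursion, and inner function
--     Tests:      get_aspect_ratio((1920, 1080)) -> (16, 9)
--     Stub:       def get_aspect_ratio(resolution): aspect_ratio
--     '''
--     # Conditions:
--     # - Number of elements in tuple is 2
--     # - Elements are integer
--     # - No value is zero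
--     assert  len(resolution) == 2 and \
--             tuple(map(int, resolution)) and \
--             all(resolution)
--
--
--     def get_gcd(big_number, small_number):
--         '''
--         Signature:  Recursion | 2 Integers -> Integer
--         Purpose:    Produce an integer that is the greatest common divisor of
--                     2 given integers using Euclid's algorithm
--         Tests:      N/A
--         Stub:       def get_gcd(big_number, small_number)
--         '''
--         if big_number == small_number:
--             return big_number # Return itself as the GCD
--         elif big_number < small_number:
--             return get_gcd(small_number, big_number)
--             # big_number is smaller than small_number, return adjusted function
--
--         if small_number == 0:
--             return big_number
--         else:
--             return get_gcd(small_number, big_number % small_number)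
--
--
--     gcd = get_gcd(*resolution)  # Assign gcd using get_gcd()
--     return tuple(number // gcd for number in resolution)  # Divide width, height by GCD
-- ===== SOURCE B (Python) =====
-- def get_aspect_ratio(resolution):
--     # Same task, iterative: Euclid's algorithm as the standard while-loop.
--     assert len(resolution) == 2 and all(resolution)
--     w, h = resolution
--     while h:
--         w, h = h, w % h
--     return (resolution[0] // w, resolution[1] // w)
-- ===== Notes on version B (the rewrite author's own statement) =====
-- stated objective: idiomatic
-- what changed: Replaces the recursive inner get_gcd (with its explicit equality/swap branches) by the standard iterative Euclid while-loop 'w, h = h, w % h', eliminating the helper function and recursion.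
import Mathlib
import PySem

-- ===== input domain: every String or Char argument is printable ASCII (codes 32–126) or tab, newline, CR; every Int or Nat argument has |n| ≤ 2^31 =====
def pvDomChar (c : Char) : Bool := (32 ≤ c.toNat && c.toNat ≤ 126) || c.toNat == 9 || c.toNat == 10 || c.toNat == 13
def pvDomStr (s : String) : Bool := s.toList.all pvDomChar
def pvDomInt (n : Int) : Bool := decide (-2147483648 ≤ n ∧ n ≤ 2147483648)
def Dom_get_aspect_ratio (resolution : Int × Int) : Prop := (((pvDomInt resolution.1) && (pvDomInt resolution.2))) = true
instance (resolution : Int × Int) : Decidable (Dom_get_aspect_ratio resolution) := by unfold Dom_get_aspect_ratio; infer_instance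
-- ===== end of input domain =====

-- B replaces the recursive inner get_gcd by the standard iterative Euclid while-loop (idiomatic; same cost).

-- ===== PORT A =====
-- A's inner recursive get_gcd; the recursion does not terminate for all Int inputs
-- (mixed-sign unequal inputs loop forever in Python), so the port carries fuel; on
-- every input admitted by Pre_ the fuel chosen below is sufficient (proved in the lemmas).
def gcdA : Nat → Int → Int → Option Int
  | 0, _, _ => none
  | fuel+1, big_number, small_number =>
    if big_number = small_number then some big_number
    else if big_number < small_number then gcdA fuel small_number big_number
    else if small_number = 0 then some big_number
    else gcdA fuel small_number (PySem.Int.mod big_number small_number)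

def get_aspect_ratio (resolution : Int × Int) : Int × Int :=
  match gcdA (resolution.1.natAbs + resolution.2.natAbs + 2) resolution.1 resolution.2 with
  | some gcd => (PySem.Int.floordiv resolution.1 gcd, PySem.Int.floordiv resolution.2 gcd)
  | none => (0, 0)   -- fuel exhausted: Python diverges here; outside Pre_

-- ===== PORT B =====
-- Python % has |w % h| < |h| (sign of the divisor), so B's while-loop always terminates.
theorem pymod_natAbs_lt (w h : Int) (hh : h ≠ 0) : (PySem.Int.mod w h).natAbs < h.natAbs := by
  rcases lt_or_gt_of_ne hh with hneg | hpos
  · have hb := PySem.Int.mod_neg_bounds w hneg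
    omega
  · have h1 := PySem.Int.mod_nonneg w hpos
    have h2 := PySem.Int.mod_lt w hpos
    omega

-- the 'while h: w, h = h, w % h' loop of B
def gcdB (w h : Int) : Int :=
  if hh : h = 0 then w else gcdB h (PySem.Int.mod w h)
termination_by h.natAbs
decreasing_by exact pymod_natAbs_lt w h hh

def get_aspect_ratio_alt (resolution : Int × Int) : Int × Int :=
  let g := gcdB resolution.1 resolution.2
  (PySem.Int.floordiv resolution.1 g, PySem.Int.floordiv resolution.2 g)

-- ===== PRECONDITION & SPEC =====
-- Pre_ admits exactly the inputs on which the Python A returns: both components positive,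
-- or the two components equal and nonzero. Elsewhere A raises AssertionError (a zero
-- component) or its recursion never terminates (unequal with a negative component).
def Pre_get_aspect_ratio (resolution : Int × Int) : Prop :=
  (0 < resolution.1 ∧ 0 < resolution.2) ∨ (resolution.1 = resolution.2 ∧ resolution.1 ≠ 0)
instance (resolution : Int × Int) : Decidable (Pre_get_aspect_ratio resolution) := by
  unfold Pre_get_aspect_ratio; infer_instance

def pvWitness_get_aspect_ratio : (Int × Int) := (1920, 1080)

def Spec_get_aspect_ratio (resolution : Int × Int) (out : Int × Int) : Prop := out = get_aspect_ratio_alt resolution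
instance (resolution : Int × Int) (out : Int × Int) : Decidable (Spec_get_aspect_ratio resolution out) := by unfold Spec_get_aspect_ratio; infer_instance

-- ===== CLAIM (what is proved, stated in full; the proofs are below) =====
def Claim_equal_get_aspect_ratio : Prop := ∀ (resolution : Int × Int), Dom_get_aspect_ratio resolution → Pre_get_aspect_ratio resolution → Spec_get_aspect_ratio resolution (get_aspect_ratio resolution)

-- ===== LEMMAS AND PROOFS =====

theorem gcdA_succ (f : Nat) (b s : Int) :
    gcdA (f+1) b s = if b = s then some b else if b < s then gcdA f s b
      else if s = 0 then some b else gcdA f s (PySem.Int.mod b s) := rfl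

theorem gcdB_eq (w h : Int) :
    gcdB w h = if h = 0 then w else gcdB h (PySem.Int.mod w h) := by
  rw [gcdB]; split <;> simp_all

theorem gcdB_self (a : Int) (ha : a ≠ 0) : gcdB a a = a := by
  rw [gcdB_eq, if_neg ha]
  have hm : PySem.Int.mod a a = 0 := (PySem.Int.mod_eq_zero_iff_dvd a a).mpr dvd_rfl
  rw [hm, gcdB_eq, if_pos rfl]

theorem gcdA_self (f : Nat) (a : Int) (hf : 0 < f) : gcdA f a a = some a := by
  cases f with
  | zero => omega
  | succ f => rw [gcdA_succ, if_pos rfl]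

-- core invariant: with 0 ≤ h < w and enough fuel, A's recursion computes B's loop value
theorem gcdA_eq_gcdB (f : Nat) (w h : Int) (h0 : 0 ≤ h) (hlt : h < w)
    (hf : h.natAbs < f) : gcdA f w h = some (gcdB w h) := by
  induction f generalizing w h with
  | zero => omega
  | succ f ih =>
    rw [gcdA_succ, if_neg (by omega), if_neg (by omega)]
    by_cases hz : h = 0
    · rw [if_pos hz, hz, gcdB_eq, if_pos rfl]
    · rw [if_neg hz, gcdB_eq, if_neg hz]
      have hpos : (0:Int) < h := lt_of_le_of_ne h0 (Ne.symm hz)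
      have h1 := PySem.Int.mod_nonneg w hpos
      have h2 := PySem.Int.mod_lt w hpos
      exact ih h (PySem.Int.mod w h) h1 h2 (by omega)

theorem gcd_agree (a b : Int) (hp : Pre_get_aspect_ratio (a, b)) :
    gcdA (a.natAbs + b.natAbs + 2) a b = some (gcdB a b) := by
  rcases hp with ⟨ha, hb⟩ | ⟨heq, hne⟩
  · replace ha : 0 < a := ha
    replace hb : 0 < b := hb
    rcases lt_trichotomy a b with hab | hab | hab
    · -- a < b: A does one swap step, B's first loop step replaces (a, b) by (b, a % b) = (b, a)
      have hm : PySem.Int.mod a b = a := by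
        rw [PySem.Int.mod_eq_emod_of_pos hb]
        exact Int.emod_eq_of_lt (by omega) hab
      have hswap : gcdB a b = gcdB b a := by
        rw [gcdB_eq a b, if_neg (by omega), hm]
      rw [hswap, show a.natAbs + b.natAbs + 2 = (a.natAbs + b.natAbs + 1) + 1 from rfl,
          gcdA_succ, if_neg (by omega), if_pos hab]
      exact gcdA_eq_gcdB _ b a (by omega) hab (by omega)
    · rw [hab, gcdA_self _ _ (by omega), gcdB_self b (by omega)]
    · exact gcdA_eq_gcdB _ a b (by omega) hab (by omega)
  · replace heq : a = b := heq
    replace hne : a ≠ 0 := hne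
    rw [heq, gcdA_self _ _ (by omega), gcdB_self b (by omega)]

-- ===== VERDICT (by name: the statement is the Claim_ definition above) =====
theorem get_aspect_ratio_spec : Claim_equal_get_aspect_ratio := by
  intro r _ hp
  obtain ⟨a, b⟩ := r
  unfold Spec_get_aspect_ratio get_aspect_ratio get_aspect_ratio_alt
  simp only [gcd_agree a b hp]
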